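-- pv_equiv track=rewrite | github.com/grnwood/stillpoint | sp/app/quickcapture.py | _append_quick_capture_section
-- ===== SOURCE A (Python) =====
-- def _append_quick_capture_section(content: str, entry_lines: list[str]) -> str:
--     if not entry_lines:
--         return content
--     section_title = "## Inbox / Captures"
--     lines = content.splitlines()
--     header_idx = next((i for i, line in enumerate(lines) if line.strip() == section_title), -1)
--     if header_idx == -1:
--         trimmed = content.rstrip("\n")
--         spacer = "\n\n" if trimmed else ""
--         return f"{trimmed}{spacer}{section_title}\n" + "\n".join(entry_lines) + "\n"
--     insert_at = len(lines)
--     for i in range(header_idx + 1, len(lines)):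
--         if lines[i].startswith("#"):
--             insert_at = i
--             break
--     new_lines = lines[:insert_at] + entry_lines + lines[insert_at:]
--     result = "\n".join(new_lines)
--     if not result.endswith("\n"):
--         result += "\n"
--     return result
-- ===== SOURCE B (Python) =====
-- def _append_quick_capture_section(content: str, entry_lines: list[str]) -> str:
--     if not entry_lines:
--         return content
--     title = "## Inbox / Captures"
--     lines = content.splitlines()
--     # parse into blocks: a new block starts at every line beginning with '#'
--     blocks = [[]]
--     for ln in lines:
--         if ln.startswith("#"):
--             blocks.append([ln])
--         else:
--             blocks[-1].append(ln)
--     # append the entries to the end of the first block containing the header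
--     out = []
--     found = False
--     for blk in blocks:
--         if not found and any(l.strip() == title for l in blk):
--             out.extend(blk + entry_lines)
--             found = True
--         else:
--             out.extend(blk)
--     if not found:
--         trimmed = content.rstrip("\n")
--         spacer = "\n\n" if trimmed else ""
--         return f"{trimmed}{spacer}{title}\n" + "\n".join(entry_lines) + "\n"
--     result = "\n".join(out)
--     return result if result.endswith("\n") else result + "\n"
-- ===== Notes on version B (the rewrite author's own statement) =====
-- stated objective: alternative
-- what changed: B parses the document into header-delimited blocks in one pass and appends the entries to the end of the first block containing the target header, instead of A's index-based scan for the header position followed by a second indexed scan for the next '#' line and a slice splice.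
import Mathlib
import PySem

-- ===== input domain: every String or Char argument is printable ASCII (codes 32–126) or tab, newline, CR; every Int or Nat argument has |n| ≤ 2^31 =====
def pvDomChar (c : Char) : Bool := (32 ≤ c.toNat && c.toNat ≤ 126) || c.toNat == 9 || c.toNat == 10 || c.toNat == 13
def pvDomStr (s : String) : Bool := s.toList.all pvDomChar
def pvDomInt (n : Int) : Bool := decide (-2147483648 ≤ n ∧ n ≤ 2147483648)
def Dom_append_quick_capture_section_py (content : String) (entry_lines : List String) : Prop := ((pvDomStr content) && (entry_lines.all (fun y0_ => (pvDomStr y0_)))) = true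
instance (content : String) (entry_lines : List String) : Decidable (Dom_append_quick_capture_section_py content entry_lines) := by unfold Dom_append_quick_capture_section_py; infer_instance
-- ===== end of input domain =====

-- B re-implements the insertion via a one-pass block decomposition instead of A's two indexed scans
-- plus slice splice (objective: alternative; same return value on every input).

-- ===== PORT A =====
-- the 'for i in range(header_idx+1, len(lines)): if lines[i].startswith("#"): insert_at = i; break' loop
def aqc_findBreak (lines : List (List Char)) (i : Nat) : Nat :=
  if h : i < lines.length then
    if PySem.Chars.startswith lines[i] ['#'] then i
    else aqc_findBreak lines (i + 1)
  else lines.length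
termination_by lines.length - i

def append_quick_capture_section_py (content : String) (entry_lines : List String) : String :=
  if entry_lines = [] then content
  else
    let title := "## Inbox / Captures".toList
    let lines := PySem.Chars.splitlines content.toList
    -- next((i for i, line in enumerate(lines) if line.strip() == section_title), -1), matched on found/not found
    match lines.findIdx? (fun line => PySem.Chars.strip line == title) with
    | none =>
        -- content.rstrip("\n"): exact hand port, the strip set is the single char '\n'
        let trimmed := (content.toList.reverse.dropWhile (fun c => c == '\n')).reverse
        let spacer := if trimmed.isEmpty then ([] : List Char) else ['\n', '\n']
        String.ofList (trimmed ++ spacer ++ title ++ ['\n'] ++ PySem.Chars.join ['\n'] (entry_lines.map (·.toList)) ++ ['\n'])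
    | some header_idx =>
        let insert_at := aqc_findBreak lines (header_idx + 1)
        let new_lines := lines.take insert_at ++ entry_lines.map (·.toList) ++ lines.drop insert_at
        let result := PySem.Chars.join ['\n'] new_lines
        String.ofList (if PySem.Chars.endswith result ['\n'] then result else result ++ ['\n'])

-- ===== PORT B =====
def append_quick_capture_section_py_alt (content : String) (entry_lines : List String) : String :=
  if entry_lines = [] then content
  else
    let title := "## Inbox / Captures".toList
    let lines := PySem.Chars.splitlines content.toList
    -- blocks = [[]]; for ln in lines: new block at each '#' line, else append to last block
    let blocks := lines.foldl
      (fun bs ln => if PySem.Chars.startswith ln ['#'] then bs ++ [[ln]]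
                    else bs.dropLast ++ [bs.getLastD [] ++ [ln]]) [[]]
    -- out/found loop: extend out with each block, entries appended to the first matching block
    let st := blocks.foldl
      (fun (st : List (List Char) × Bool) blk =>
        if !st.2 && blk.any (fun l => PySem.Chars.strip l == title) then
          (st.1 ++ (blk ++ entry_lines.map (·.toList)), true)
        else (st.1 ++ blk, st.2)) ([], false)
    if st.2 then
      let result := PySem.Chars.join ['\n'] st.1
      String.ofList (if PySem.Chars.endswith result ['\n'] then result else result ++ ['\n'])
    else
      let trimmed := (content.toList.reverse.dropWhile (fun c => c == '\n')).reverse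
      let spacer := if trimmed.isEmpty then ([] : List Char) else ['\n', '\n']
      String.ofList (trimmed ++ spacer ++ title ++ ['\n'] ++ PySem.Chars.join ['\n'] (entry_lines.map (·.toList)) ++ ['\n'])

-- ===== PRECONDITION & SPEC =====
def Spec_append_quick_capture_section_py (content : String) (entry_lines : List String) (out : String) : Prop := out = append_quick_capture_section_py_alt content entry_lines
instance (content : String) (entry_lines : List String) (out : String) : Decidable (Spec_append_quick_capture_section_py content entry_lines out) := by unfold Spec_append_quick_capture_section_py; infer_instance

-- ===== CLAIM (what is proved, stated in full; the proofs are below) =====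
def Claim_equal_append_quick_capture_section_py : Prop := ∀ (content : String) (entry_lines : List String), Dom_append_quick_capture_section_py content entry_lines → Spec_append_quick_capture_section_py content entry_lines (append_quick_capture_section_py content entry_lines)

-- ===== LEMMAS AND PROOFS =====

-- predicates shared by the reasoning: p = header match, q = continuation line (not '#')
def pvP (title : List Char) (l : List Char) : Bool := PySem.Chars.strip l == title
def pvQ (l : List Char) : Bool := !(PySem.Chars.startswith l ['#'])

-- the common abstract result: insert E after the first p-line's run of q-lines, none if no p-line
def pvIns (E : List (List Char)) (title : List Char) : List (List Char) → Option (List (List Char))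
  | [] => none
  | l :: ls =>
      if pvP title l then some (l :: (ls.takeWhile pvQ ++ E ++ ls.dropWhile pvQ))
      else (pvIns E title ls).map (l :: ·)

-- block tail: blocks of a line list starting with a non-q line (or empty)
def pvBT : List (List Char) → List (List (List Char))
  | [] => []
  | d :: ds => (d :: ds.takeWhile pvQ) :: pvBT (ds.dropWhile pvQ)
termination_by r => r.length
decreasing_by simpa using Nat.lt_succ_of_le (List.length_dropWhile_le _ _)

theorem pv_take_tw (q : List Char → Bool) (ls : List (List Char)) :
    ls.take ((ls.takeWhile q).length) = ls.takeWhile q := by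
  induction ls with
  | nil => simp
  | cons l ls ih => by_cases h : q l <;> simp [h, ih]

theorem pv_drop_tw (q : List Char → Bool) (ls : List (List Char)) :
    ls.drop ((ls.takeWhile q).length) = ls.dropWhile q := by
  induction ls with
  | nil => simp
  | cons l ls ih => by_cases h : q l <;> simp [h, ih]

theorem pv_fb_eq (lines : List (List Char)) (i : Nat) (hi : i ≤ lines.length) :
    aqc_findBreak lines i = i + ((lines.drop i).takeWhile pvQ).length := by
  fun_induction aqc_findBreak lines i with
  | case1 i h hsw =>
      rw [List.drop_eq_getElem_cons h]
      simp [pvQ, hsw]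
  | case2 i h hsw ih =>
      rw [List.drop_eq_getElem_cons h, ih (by omega)]
      simp only [List.takeWhile_cons, pvQ, hsw]
      simp
      omega
  | case3 i h =>
      have hii : i = lines.length := by omega
      subst hii
      simp

theorem pv_findIdx?_lt (p : List Char → Bool) (ls : List (List Char)) (h : Nat)
    (hf : ls.findIdx? p = some h) : h < ls.length := by
  induction ls generalizing h with
  | nil => simp at hf
  | cons l ls ih =>
      rw [List.findIdx?_cons] at hf
      by_cases hp : p l
      · simp [hp] at hf
        simp [← hf]
      · simp [hp] at hf
        obtain ⟨h', hh', rfl⟩ := hf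
        simpa using ih h' hh'

-- (I) A's found/not-found computation is pvIns
theorem pv_A_eq_ins (E : List (List Char)) (title : List Char) (lines : List (List Char)) :
    (match lines.findIdx? (fun line => pvP title line) with
     | none => none
     | some h => some (lines.take (aqc_findBreak lines (h + 1)) ++ E ++ lines.drop (aqc_findBreak lines (h + 1))))
    = pvIns E title lines := by
  induction lines with
  | nil => simp [pvIns]
  | cons l ls ih =>
      rw [List.findIdx?_cons]
      by_cases hp : pvP title l
      · simp only [hp, if_true]
        show some ((l :: ls).take (aqc_findBreak (l :: ls) (0 + 1)) ++ E ++ (l :: ls).drop (aqc_findBreak (l :: ls) (0 + 1)))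
          = pvIns E title (l :: ls)
        rw [show (0 : Nat) + 1 = 1 from rfl, pv_fb_eq (l :: ls) 1 (by simp)]
        rw [show (l :: ls).drop 1 = ls from rfl,
            show 1 + (ls.takeWhile pvQ).length = (ls.takeWhile pvQ).length + 1 from by omega,
            List.take_succ_cons, List.drop_succ_cons, pv_take_tw, pv_drop_tw]
        simp [pvIns, hp]
      · have hp' : pvP title l = false := by simpa using hp
        simp only [hp', Bool.false_eq_true, if_false]
        cases hf : ls.findIdx? (fun line => pvP title line) with
        | none =>
            rw [hf] at ih
            simp only [Option.map_none]
            simp [pvIns, hp', ← ih]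
        | some h' =>
            rw [hf] at ih
            simp only [Option.map_some]
            show some ((l :: ls).take (aqc_findBreak (l :: ls) (h' + 1 + 1)) ++ E ++ (l :: ls).drop (aqc_findBreak (l :: ls) (h' + 1 + 1)))
              = pvIns E title (l :: ls)
            have hlt : h' < ls.length := pv_findIdx?_lt _ ls h' hf
            have hfb : aqc_findBreak (l :: ls) (h' + 1 + 1) = aqc_findBreak ls (h' + 1) + 1 := by
              rw [pv_fb_eq (l :: ls) (h' + 1 + 1) (by simp; omega),
                  pv_fb_eq ls (h' + 1) (by omega)]
              rw [show (l :: ls).drop (h' + 1 + 1) = ls.drop (h' + 1) from rfl]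
              omega
            rw [hfb, List.take_succ_cons, List.drop_succ_cons]
            simp [pvIns, hp', ← ih]

-- skipping a run of non-matching lines
theorem pv_ins_skip (E : List (List Char)) (title : List Char) (b r : List (List Char))
    (hb : ∀ l ∈ b, pvP title l = false) :
    pvIns E title (b ++ r) = (pvIns E title r).map (b ++ ·) := by
  induction b with
  | nil => simp
  | cons x b ih =>
      have hx : pvP title x = false := hb x (by simp)
      simp only [List.cons_append, pvIns, hx, Bool.false_eq_true, if_false]
      rw [ih (fun l hl => hb l (by simp [hl]))]
      cases pvIns E title r <;> simp

theorem pv_tw_append_all (q : List Char → Bool) (b r : List (List Char)) (hb : ∀ l ∈ b, q l = true) :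
    (b ++ r).takeWhile q = b ++ r.takeWhile q := by
  induction b with
  | nil => simp
  | cons x b ih =>
      rw [List.cons_append, List.takeWhile_cons, if_pos (by simp [hb x (by simp)]),
          ih (fun l hl => hb l (by simp [hl]))]
      simp

theorem pv_dw_append_all (q : List Char → Bool) (b r : List (List Char)) (hb : ∀ l ∈ b, q l = true) :
    (b ++ r).dropWhile q = r.dropWhile q := by
  induction b with
  | nil => simp
  | cons x b ih =>
      simp only [List.cons_append, List.dropWhile_cons, hb x (by simp)]
      exact ih (fun l hl => hb l (by simp [hl]))

theorem pv_tw_nil_dw (q : List Char → Bool) (r : List (List Char)) (h : r.takeWhile q = []) :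
    r.dropWhile q = r := by
  cases r with
  | nil => simp
  | cons d ds =>
      rw [List.takeWhile_cons] at h
      by_cases hd : q d
      · simp [hd] at h
      · simp [hd]

-- entries land at the end of a matching all-q run when the tail starts non-q
theorem pv_ins_in_run (E : List (List Char)) (title : List Char) (b r : List (List Char))
    (hq : ∀ l ∈ b, pvQ l = true) (hm : b.any (fun l => pvP title l) = true)
    (hr : r.takeWhile pvQ = []) :
    pvIns E title (b ++ r) = some (b ++ E ++ r) := by
  induction b with
  | nil => simp at hm
  | cons m b ih =>
      by_cases hp : pvP title m
      · simp only [List.cons_append, pvIns, hp, if_pos]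
        rw [pv_tw_append_all pvQ b r (fun l hl => hq l (by simp [hl])),
            pv_dw_append_all pvQ b r (fun l hl => hq l (by simp [hl])),
            hr, pv_tw_nil_dw pvQ r hr]
        simp
      · have hm' : b.any (fun l => pvP title l) = true := by
          simp only [List.any_cons, hp] at hm; simpa using hm
        simp only [List.cons_append, pvIns, hp, Bool.false_eq_true, if_false]
        rw [ih (fun l hl => hq l (by simp [hl])) hm']
        simp

-- same, for a whole block (its first line may be a '#' line)
theorem pv_ins_run_block (E : List (List Char)) (title : List Char) (d : List Char) (b r : List (List Char))
    (hq : ∀ l ∈ b, pvQ l = true) (hm : (d :: b).any (fun l => pvP title l) = true)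
    (hr : r.takeWhile pvQ = []) :
    pvIns E title (d :: b ++ r) = some (d :: b ++ E ++ r) := by
  by_cases hp : pvP title d
  · simp only [List.cons_append, pvIns, hp, if_pos]
    rw [pv_tw_append_all pvQ b r hq, pv_dw_append_all pvQ b r hq, hr, pv_tw_nil_dw pvQ r hr]
    simp
  · have hm' : b.any (fun l => pvP title l) = true := by
      simp only [List.any_cons, hp] at hm; simpa using hm
    simp only [List.cons_append, pvIns, hp, Bool.false_eq_true, if_false]
    rw [pv_ins_in_run E title b r hq hm' hr]
    simp

-- flatten of the block tail restores the lines
theorem pv_bt_flatten (r : List (List Char)) (hr : r.takeWhile pvQ = []) :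
    (pvBT r).flatten = r := by
  fun_induction pvBT r with
  | case1 => simp
  | case2 d ds ih =>
      have h2 : (ds.dropWhile pvQ).takeWhile pvQ = List.takeWhile pvQ (ds.dropWhile pvQ) := rfl
      rw [List.flatten_cons, ih ?_]
      · simp [List.takeWhile_append_dropWhile]
      · cases hdd : ds.dropWhile pvQ with
        | nil => simp
        | cons e es =>
            have : pvQ e = false := by
              have := List.head_dropWhile_not pvQ (l := ds) (by simp [hdd])
              simpa [hdd] using this
            simp [this]

-- the second fold after the entries were planted just flattens
theorem pv_fold2_true (title : List Char) (E : List (List Char)) (bs : List (List (List Char)))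
    (acc : List (List Char)) :
    bs.foldl (fun (st : List (List Char) × Bool) blk =>
        if !st.2 && blk.any (fun l => PySem.Chars.strip l == title) then (st.1 ++ (blk ++ E), true)
        else (st.1 ++ blk, st.2)) (acc, true) = (acc ++ bs.flatten, true) := by
  induction bs generalizing acc with
  | nil => simp
  | cons b bs ih =>
      rw [List.foldl_cons, if_neg (by simp), ih]
      simp

-- the first fold builds exactly first-run :: block tail
theorem pv_fold1_eq (ls : List (List Char)) (front : List (List (List Char))) (cur : List (List Char)) :
    ls.foldl (fun bs ln => if PySem.Chars.startswith ln ['#'] then bs ++ [[ln]]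
                           else bs.dropLast ++ [bs.getLastD [] ++ [ln]]) (front ++ [cur])
    = front ++ ((cur ++ ls.takeWhile pvQ) :: pvBT (ls.dropWhile pvQ)) := by
  induction ls generalizing front cur with
  | nil => simp [pvBT]
  | cons ln ls ih =>
      by_cases hsw : PySem.Chars.startswith ln ['#']
      · simp only [List.foldl_cons, hsw, if_pos]
        have : front ++ [cur] ++ [[ln]] = (front ++ [cur]) ++ [[ln]] := by simp
        rw [this, ih (front ++ [cur]) [ln]]
        have hq : pvQ ln = false := by simp [pvQ, hsw]
        simp [hq, pvBT]
      · simp only [List.foldl_cons, hsw, Bool.false_eq_true, if_false]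
        have h1 : (front ++ [cur]).dropLast = front := by simp
        have h2 : (front ++ [cur]).getLastD [] = cur := by simp
        rw [h1, h2, ih front (cur ++ [ln])]
        have hq : pvQ ln = true := by simp [pvQ, hsw]
        simp [hq]

-- the second fold over the block tail computes pvIns
theorem pv_fold2_bt (title : List Char) (E : List (List Char)) :
    ∀ n (r : List (List Char)), r.length ≤ n → r.takeWhile pvQ = [] →
    ∀ acc : List (List Char),
    (pvBT r).foldl (fun (st : List (List Char) × Bool) blk =>
        if !st.2 && blk.any (fun l => PySem.Chars.strip l == title) then (st.1 ++ (blk ++ E), true)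
        else (st.1 ++ blk, st.2)) (acc, false)
    = (match pvIns E title r with
       | none => (acc ++ r, false)
       | some nl => (acc ++ nl, true)) := by
  intro n
  induction n with
  | zero =>
      intro r hr _ acc
      have : r = [] := by cases r <;> simp_all
      subst this
      simp [pvBT, pvIns]
  | succ n ih =>
      intro r hr htw acc
      cases r with
      | nil => simp [pvBT, pvIns]
      | cons d ds =>
          have hd : pvQ d = false := by
            rw [List.takeWhile_cons] at htw
            by_cases h : pvQ d
            · simp [h] at htw
            · simpa using h
          have hds : ds = ds.takeWhile pvQ ++ ds.dropWhile pvQ := (List.takeWhile_append_dropWhile).symm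
          have hq' : ∀ l ∈ ds.takeWhile pvQ, pvQ l = true := fun l hl => List.mem_takeWhile_imp hl
          have htw' : (ds.dropWhile pvQ).takeWhile pvQ = [] := by
            cases hdd : ds.dropWhile pvQ with
            | nil => simp
            | cons e es =>
                have : pvQ e = false := by
                  have := List.head_dropWhile_not pvQ (l := ds) (by simp [hdd])
                  simpa [hdd] using this
                simp [this]
          rw [show pvBT (d :: ds) = (d :: ds.takeWhile pvQ) :: pvBT (ds.dropWhile pvQ) from by rw [pvBT]]
          by_cases hany : (d :: ds.takeWhile pvQ).any (fun l => pvP title l)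
          · -- match in this block: plant entries, rest just flattens
            have hins : pvIns E title (d :: ds) = some ((d :: ds.takeWhile pvQ) ++ E ++ ds.dropWhile pvQ) := by
              conv_lhs => rw [show d :: ds = (d :: ds.takeWhile pvQ) ++ ds.dropWhile pvQ from by rw [List.cons_append, ← hds]]
              refine pv_ins_run_block E title d (ds.takeWhile pvQ) (ds.dropWhile pvQ) hq' hany htw'
            simp only [List.foldl_cons]
            rw [if_pos (by simpa [pvP] using hany)]
            rw [pv_fold2_true title E _ _, pv_bt_flatten _ htw', hins]
            simp
          · have hnone : ∀ l ∈ (d :: ds.takeWhile pvQ), pvP title l = false := by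
              intro l hl
              by_contra hc
              exact hany (List.any_eq_true.mpr ⟨l, hl, by simpa using hc⟩)
            have hskip : pvIns E title (d :: ds) = (pvIns E title (ds.dropWhile pvQ)).map ((d :: ds.takeWhile pvQ) ++ ·) := by
              conv_lhs => rw [show d :: ds = (d :: ds.takeWhile pvQ) ++ ds.dropWhile pvQ from by rw [List.cons_append, ← hds]]
              exact pv_ins_skip E title _ _ hnone
            simp only [List.foldl_cons]
            rw [if_neg (by simpa [pvP] using hany)]
            have hlen : (ds.dropWhile pvQ).length ≤ n := by
              have h1 : (ds.dropWhile pvQ).length ≤ ds.length := List.length_dropWhile_le _ _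
              simp at hr; omega
            rw [ih (ds.dropWhile pvQ) hlen htw' (acc ++ (d :: ds.takeWhile pvQ))]
            rw [hskip]
            cases pvIns E title (ds.dropWhile pvQ) with
            | none =>
                simp only [Option.map_none]
                congr 1
                conv_rhs => rw [hds]
                simp
            | some nl => simp

theorem pv_dw_tw_nil (ls : List (List Char)) : (ls.dropWhile pvQ).takeWhile pvQ = [] := by
  cases hdd : ls.dropWhile pvQ with
  | nil => simp
  | cons e es =>
      have : pvQ e = false := by
        have := List.head_dropWhile_not pvQ (l := ls) (by simp [hdd])
        simpa [hdd] using this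
      simp [this]

-- (II) B's two folds compute pvIns
theorem pv_B_st (title : List Char) (E : List (List Char)) (lines : List (List Char)) :
    (lines.foldl (fun bs ln => if PySem.Chars.startswith ln ['#'] then bs ++ [[ln]]
                               else bs.dropLast ++ [bs.getLastD [] ++ [ln]]) [[]]).foldl
      (fun (st : List (List Char) × Bool) blk =>
        if !st.2 && blk.any (fun l => PySem.Chars.strip l == title) then (st.1 ++ (blk ++ E), true)
        else (st.1 ++ blk, st.2)) ([], false)
    = (match pvIns E title lines with
       | none => (lines, false)
       | some nl => (nl, true)) := by
  have h1 := pv_fold1_eq lines [] []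
  simp only [List.nil_append] at h1
  rw [h1, List.foldl_cons]
  have hq : ∀ l ∈ lines.takeWhile pvQ, pvQ l = true := fun l hl => List.mem_takeWhile_imp hl
  by_cases hA : (lines.takeWhile pvQ).any (fun l => pvP title l)
  · rw [if_pos (by simpa [pvP] using hA)]
    rw [pv_fold2_true title E _ _, pv_bt_flatten _ (pv_dw_tw_nil lines)]
    have hins : pvIns E title lines = some (lines.takeWhile pvQ ++ E ++ lines.dropWhile pvQ) := by
      conv_lhs => rw [show lines = lines.takeWhile pvQ ++ lines.dropWhile pvQ from (List.takeWhile_append_dropWhile).symm]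
      exact pv_ins_in_run E title _ _ hq hA (pv_dw_tw_nil lines)
    rw [hins]
    simp
  · rw [if_neg (by simpa [pvP] using hA)]
    rw [pv_fold2_bt title E (lines.dropWhile pvQ).length (lines.dropWhile pvQ) le_rfl (pv_dw_tw_nil lines) _]
    have hnone : ∀ l ∈ lines.takeWhile pvQ, pvP title l = false := by
      intro l hl
      by_contra hc
      exact hA (List.any_eq_true.mpr ⟨l, hl, by simpa using hc⟩)
    have hskip : pvIns E title lines = (pvIns E title (lines.dropWhile pvQ)).map (lines.takeWhile pvQ ++ ·) := by
      conv_lhs => rw [show lines = lines.takeWhile pvQ ++ lines.dropWhile pvQ from (List.takeWhile_append_dropWhile).symm]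
      exact pv_ins_skip E title _ _ hnone
    rw [hskip]
    cases pvIns E title (lines.dropWhile pvQ) with
    | none =>
        simp only [Option.map_none, List.nil_append]
        rw [show lines.takeWhile pvQ ++ lines.dropWhile pvQ = lines from List.takeWhile_append_dropWhile]
    | some nl => simp

-- ===== VERDICT (by name: the statement is the Claim_ definition above) =====
theorem append_quick_capture_section_py_spec : Claim_equal_append_quick_capture_section_py := by
  intro content entry_lines _
  unfold Spec_append_quick_capture_section_py
  by_cases he : entry_lines = []
  · simp [append_quick_capture_section_py, append_quick_capture_section_py_alt, he]
  · unfold append_quick_capture_section_py append_quick_capture_section_py_alt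
    rw [if_neg he, if_neg he]
    simp only []
    have hst := pv_B_st ("## Inbox / Captures".toList) (entry_lines.map (·.toList))
      (PySem.Chars.splitlines content.toList)
    have hA := pv_A_eq_ins (entry_lines.map (·.toList)) ("## Inbox / Captures".toList)
      (PySem.Chars.splitlines content.toList)
    simp only [pvP] at hA
    rw [hst]
    cases hK : pvIns (entry_lines.map (·.toList)) ("## Inbox / Captures".toList)
        (PySem.Chars.splitlines content.toList) with
    | none =>
        rw [hK] at hA
        cases hf : (PySem.Chars.splitlines content.toList).findIdx?
            (fun line => PySem.Chars.strip line == "## Inbox / Captures".toList) with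
        | none => rfl
        | some h => rw [hf] at hA; simp at hA
    | some nl =>
        rw [hK] at hA
        cases hf : (PySem.Chars.splitlines content.toList).findIdx?
            (fun line => PySem.Chars.strip line == "## Inbox / Captures".toList) with
        | none => rw [hf] at hA; simp at hA
        | some h =>
            rw [hf] at hA
            simp only [Option.some.injEq] at hA
            simp only [hA]
            simp
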